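-- pv_equiv track=rewrite | github.com/sanchous1000/fall-24 | students/ie-danilenko/lab4/source/core/model.py | get_min_loss_index
-- ===== SOURCE A (Python) =====
-- def get_min_loss_index(array):
--     min_row = None
--     min_index = -1
--
--     for index, row in enumerate(array):
--         if min_row is None or (row[0] < min_row[0]) or (row[0] == min_row[0] and row[1] < min_row[1]):
--             min_row = row
--             min_index = index
--
--     return min_index
-- ===== SOURCE B (Python) =====
-- def get_min_loss_index(array):
--     if not array:
--         return -1
--     m = min((row[0], row[1]) for row in array)
--     for i, row in enumerate(array):
--         if (row[0], row[1]) == m: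
--             return i
-- ===== Notes on version B (the rewrite author's own statement) =====
-- stated objective: alternative
-- what changed: Replaces A's single fused argmin loop (tracking the best row and index in mutable state) by a two-pass decomposition: first compute the minimum (row[0],row[1]) key with builtin min, then locate the first index whose key equals it.
-- outside the precondition, e.g. on get_min_loss_index([[5], [3, 1]]): A returns 1, B raises IndexError
import Mathlib
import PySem

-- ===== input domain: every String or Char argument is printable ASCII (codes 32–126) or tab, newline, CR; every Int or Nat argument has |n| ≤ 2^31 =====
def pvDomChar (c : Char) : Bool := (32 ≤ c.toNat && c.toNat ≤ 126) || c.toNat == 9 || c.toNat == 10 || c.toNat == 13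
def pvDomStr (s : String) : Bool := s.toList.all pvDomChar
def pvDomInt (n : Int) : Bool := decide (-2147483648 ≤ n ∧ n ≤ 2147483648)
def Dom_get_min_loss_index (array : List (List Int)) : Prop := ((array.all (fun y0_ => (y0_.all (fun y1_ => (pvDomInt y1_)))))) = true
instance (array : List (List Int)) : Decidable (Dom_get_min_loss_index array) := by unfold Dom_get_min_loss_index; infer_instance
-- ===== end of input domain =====

-- B changes the decomposition only: A's fused argmin loop becomes min-key pass + first-match pass; same O(n) cost.

-- ===== PORT A =====
-- fused loop: state = (min_row, min_index, enumerate counter); indexing via pyGet? (in range on Pre_)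
def stepA (s : Option (List Int) × Int × Int) (row : List Int) : Option (List Int) × Int × Int :=
  match s with
  | (none, _, index) => (some row, index, index + 1)
  | (some min_row, min_index, index) =>
    let r0 := (PySem.List.pyGet? row 0).getD 0
    let m0 := (PySem.List.pyGet? min_row 0).getD 0
    let r1 := (PySem.List.pyGet? row 1).getD 0
    let m1 := (PySem.List.pyGet? min_row 1).getD 0
    if r0 < m0 || (r0 == m0 && r1 < m1) then (some row, index, index + 1)
    else (some min_row, min_index, index + 1)

def get_min_loss_index (array : List (List Int)) : Int :=
  (array.foldl stepA (none, -1, 0)).2.1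

-- ===== PORT B =====
-- B-side helpers: the 2-tuple key and Python's tuple '<'
def bkey (row : List Int) : Int × Int :=
  ((PySem.List.pyGet? row 0).getD 0, (PySem.List.pyGet? row 1).getD 0)

def lexLt (a b : Int × Int) : Bool := a.1 < b.1 || (a.1 == b.1 && a.2 < b.2)

def get_min_loss_index_alt (array : List (List Int)) : Int :=
  match array with
  | [] => -1
  | r :: rs =>
    -- pass 1: m = min((row[0], row[1]) for row in array)  (builtin min, ported by hand: keep smaller, first wins)
    let m := rs.foldl (fun acc row => if lexLt (bkey row) acc then bkey row else acc) (bkey r)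
    -- pass 2: first index whose key equals m (always found: m is a key; getD unreachable)
    (((r :: rs).findIdx? (fun row => bkey row = m)).map (fun n => (n : Int))).getD 0

-- ===== PRECONDITION & SPEC =====
-- Pre_ requires every row to have length ≥ 2: on shorter rows A may raise (row[0]/row[1] IndexError),
-- and on some short-row inputs where A's lazy comparisons still return (see cites), B's eager 2-tuple key raises.
def Pre_get_min_loss_index (array : List (List Int)) : Prop :=
  ∀ row ∈ array, 2 ≤ row.length
instance (array : List (List Int)) : Decidable (Pre_get_min_loss_index array) := by
  unfold Pre_get_min_loss_index; infer_instance

def pvWitness_get_min_loss_index : List (List Int) := [[1, 2], [0, 3], [0, 5]]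

def Spec_get_min_loss_index (array : List (List Int)) (out : Int) : Prop := out = get_min_loss_index_alt array
instance (array : List (List Int)) (out : Int) : Decidable (Spec_get_min_loss_index array out) := by unfold Spec_get_min_loss_index; infer_instance

-- ===== CLAIM (what is proved, stated in full; the proofs are below) =====
def Claim_equal_get_min_loss_index : Prop := ∀ (array : List (List Int)), Dom_get_min_loss_index array → Pre_get_min_loss_index array → Spec_get_min_loss_index array (get_min_loss_index array)

-- ===== LEMMAS AND PROOFS =====

-- ordering facts about lexLt
theorem lexLt_irrefl (a : Int × Int) : lexLt a a = false := by
  simp [lexLt]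

theorem lexLt_trans {a b c : Int × Int} (h1 : lexLt a b = true) (h2 : lexLt b c = true) :
    lexLt a c = true := by
  simp only [lexLt, Bool.or_eq_true, Bool.and_eq_true, decide_eq_true_eq, beq_iff_eq] at *
  omega

-- abstract recursion capturing A's loop on keys
def goA : List (List Int) → (Int × Int) → Int → Int → Int
  | [], _, bi, _ => bi
  | r :: t, bk, bi, i => if lexLt (bkey r) bk then goA t (bkey r) i (i + 1) else goA t bk bi (i + 1)

-- B's pass-1 fold
def mfold (t : List (List Int)) (bk : Int × Int) : Int × Int :=
  t.foldl (fun acc row => if lexLt (bkey row) acc then bkey row else acc) bk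

theorem mfold_cons (r : List Int) (t : List (List Int)) (bk : Int × Int) :
    mfold (r :: t) bk = if lexLt (bkey r) bk then mfold t (bkey r) else mfold t bk := by
  by_cases h : lexLt (bkey r) bk = true <;> simp [mfold, List.foldl, h]

-- A's fold, started from a committed state, is goA
theorem foldA_eq_goA (t : List (List Int)) :
    ∀ (mr : List Int) (bi i : Int),
      (t.foldl stepA (some mr, bi, i)).2.1 = goA t (bkey mr) bi i := by
  induction t with
  | nil => intro mr bi i; simp [goA]
  | cons r t ih =>
    intro mr bi i
    by_cases h : lexLt (bkey r) (bkey mr) = true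
    · have h' : stepA (some mr, bi, i) r = (some r, i, i + 1) := by
        simp only [stepA]
        rw [if_pos (by simpa [lexLt, bkey] using h)]
      simp only [List.foldl_cons, h']
      simpa [goA, h] using ih r i (i + 1)
    · have h' : stepA (some mr, bi, i) r = (some mr, bi, i + 1) := by
        simp only [stepA]
        rw [if_neg (by simpa [lexLt, bkey] using h)]
      simp only [List.foldl_cons, h']
      simpa [goA, h] using ih mr bi (i + 1)

-- either the initial key survives pass 1, or the minimum is a key found in t and strictly below the start
theorem mfold_cases (t : List (List Int)) : ∀ bk : Int × Int,
    mfold t bk = bk ∨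
      ((t.findIdx? (fun row => bkey row = mfold t bk)).isSome ∧ lexLt (mfold t bk) bk = true) := by
  induction t with
  | nil => intro bk; left; rfl
  | cons r t ih =>
    intro bk
    rw [mfold_cons]
    by_cases h : lexLt (bkey r) bk = true
    · simp only [h, if_pos]
      rcases ih (bkey r) with heq | ⟨hs, hlt⟩
      · right
        refine ⟨?_, by rw [heq]; exact h⟩
        rw [heq]
        simp [List.findIdx?_cons]
      · right
        have hne : bkey r ≠ mfold t (bkey r) := by
          intro he; rw [← he] at hlt; simp [lexLt_irrefl] at hlt
        refine ⟨?_, lexLt_trans hlt h⟩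
        have hs' : ∃ x ∈ t, bkey x = mfold t (bkey r) := by
          simpa [List.findIdx?_isSome] using hs
        simpa [List.findIdx?_cons, hne, List.findIdx?_isSome] using hs'
    · simp only [h, if_neg, Bool.false_eq_true, not_false_iff]
      rcases ih bk with heq | ⟨hs, hlt⟩
      · left; exact heq
      · right
        have hne : bkey r ≠ mfold t bk := by
          intro he; rw [← he] at hlt; exact h hlt
        refine ⟨?_, hlt⟩
        have hs' : ∃ x ∈ t, bkey x = mfold t bk := by
          simpa [List.findIdx?_isSome] using hs
        simpa [List.findIdx?_cons, hne, List.findIdx?_isSome] using hs'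

-- characterisation of goA in terms of B's two passes
theorem goA_char (t : List (List Int)) : ∀ (bk : Int × Int) (bi i : Int),
    goA t bk bi i =
      if mfold t bk = bk then bi
      else i + (((t.findIdx? (fun row => bkey row = mfold t bk)).map (fun n => (n : Int))).getD 0) := by
  induction t with
  | nil => intro bk bi i; simp [goA, mfold]
  | cons r t ih =>
    intro bk bi i
    rw [mfold_cons]
    by_cases h : lexLt (bkey r) bk = true
    · simp only [goA, h, if_pos]
      rw [ih (bkey r) i (i + 1)]
      have hm : mfold (r :: t) bk = mfold t (bkey r) := by rw [mfold_cons, if_pos h]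
      have hmne : mfold t (bkey r) ≠ bk := by
        rcases mfold_cases t (bkey r) with heq | ⟨_, hlt⟩
        · rw [heq]; intro he; rw [he] at h; simp [lexLt_irrefl] at h
        · intro he; rw [he] at hlt
          have := lexLt_trans h hlt; simp [lexLt_irrefl] at this
      rw [if_neg hmne]
      by_cases he : mfold t (bkey r) = bkey r
      · rw [if_pos he, he]
        simp [List.findIdx?_cons]
      · rw [if_neg he]
        have hne' : bkey r ≠ mfold t (bkey r) := fun hx => he hx.symm
        rcases mfold_cases t (bkey r) with heq | ⟨hs, _⟩
        · exact absurd heq he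
        · obtain ⟨j, hj⟩ := Option.isSome_iff_exists.mp hs
          simp [List.findIdx?_cons, hne', hj]
          ring
    · simp only [goA, h, Bool.false_eq_true, if_false]
      rw [ih bk bi (i + 1)]
      by_cases heq : mfold t bk = bk
      · rw [if_pos heq, if_pos heq]
      · rw [if_neg heq, if_neg heq]
        rcases mfold_cases t bk with h1 | ⟨hs, hlt⟩
        · exact absurd h1 heq
        · have hne' : bkey r ≠ mfold t bk := by
            intro he; rw [← he] at hlt; exact h hlt
          obtain ⟨j, hj⟩ := Option.isSome_iff_exists.mp hs
          simp [List.findIdx?_cons, hne', hj]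
          ring

-- ===== VERDICT (by name: the statement is the Claim_ definition above) =====
theorem get_min_loss_index_spec : Claim_equal_get_min_loss_index := by
  intro array _ _
  unfold Spec_get_min_loss_index
  cases array with
  | nil => rfl
  | cons r rs =>
    show get_min_loss_index (r :: rs) = _
    have hstep : stepA (none, -1, 0) r = (some r, 0, 0 + 1) := rfl
    have hL : get_min_loss_index (r :: rs) = goA rs (bkey r) 0 (0 + 1) := by
      unfold get_min_loss_index
      rw [List.foldl_cons, hstep, foldA_eq_goA]
    have hR : get_min_loss_index_alt (r :: rs) =
        (((r :: rs).findIdx? (fun row => bkey row = mfold rs (bkey r))).map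
          (fun n => (n : Int))).getD 0 := rfl
    rw [hL, hR, goA_char]
    by_cases he : mfold rs (bkey r) = bkey r
    · rw [if_pos he]
      simp [List.findIdx?_cons, he]
    · rw [if_neg he]
      have hne : bkey r ≠ mfold rs (bkey r) := fun hx => he hx.symm
      rcases mfold_cases rs (bkey r) with h1 | ⟨hs, _⟩
      · exact absurd h1 he
      · obtain ⟨j, hj⟩ := Option.isSome_iff_exists.mp hs
        simp [List.findIdx?_cons, hne, hj]
        ring
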